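-- pv_equiv track=rewrite | github.com/Sandmann476/ROSALIND | code/Recurrence_relations.py | rabbit_population
-- ===== SOURCE A (Python) =====
-- def rabbit_population(n, k):
--     if n <= 0:
--         return 0
--     elif n == 1 or n == 2:
--         return 1  # Starting with 1 pair of rabbits
--
--     population = [0] * (n + 1)
--     population[1] = 1  # First month with 1 pair
--     population[2] = 1  # Second month with 1 pair
--
--     for i in range(3, n + 1):
--         population[i] = population[i-1] + k * population[i-2]
--
--     return population[n]
-- ===== SOURCE B (Python) =====
-- def rabbit_population(n, k):
--     # binary exponentiation of the 2x2 companion matrix of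
--     # F(i) = F(i-1) + k*F(i-2); top-left entry of M^(n-1) is F(n)
--     if n <= 0:
--         return 0
--
--     def mul(A, B):
--         a, b, c, d = A
--         e, f, g, h = B
--         return (a * e + b * g, a * f + b * h, c * e + d * g, c * f + d * h)
--
--     R = (1, 0, 0, 1)
--     M = (1, k, 1, 0)
--     e = n - 1
--     while e > 0:
--         if e & 1:
--             R = mul(R, M)
--         M = mul(M, M)
--         e >>= 1
--     return R[0]
-- ===== Notes on version B (the rewrite author's own statement) =====
-- stated objective: alternative
-- what changed: Replaced the O(n) DP table with binary exponentiation of the 2x2 companion matrix of the recurrence (O(log n) matrix multiplications); intended as faster, measured 3-4x at n=16384 in the sandbox but unconfirmed at larger sizes where both are dominated by the exponentially growing result integers.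
import Mathlib
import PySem

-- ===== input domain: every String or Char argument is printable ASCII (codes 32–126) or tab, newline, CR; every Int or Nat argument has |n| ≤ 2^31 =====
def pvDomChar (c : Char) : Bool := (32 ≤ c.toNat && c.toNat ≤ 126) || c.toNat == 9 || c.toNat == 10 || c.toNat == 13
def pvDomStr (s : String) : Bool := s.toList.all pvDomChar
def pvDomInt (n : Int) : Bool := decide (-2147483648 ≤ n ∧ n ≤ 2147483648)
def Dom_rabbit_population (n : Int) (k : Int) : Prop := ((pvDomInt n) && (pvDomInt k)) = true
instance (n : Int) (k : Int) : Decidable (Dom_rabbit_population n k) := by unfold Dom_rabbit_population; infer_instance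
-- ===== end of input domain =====

-- B replaces A's linear DP table by binary exponentiation of the 2x2 companion matrix of the recurrence.

-- ===== PORT A =====
-- literal transliteration of A: a size-(n+1) table filled left to right
def rabbit_population (n : Int) (k : Int) : Int :=
  if n ≤ 0 then 0
  else if n = 1 ∨ n = 2 then 1
  else
    let population := List.replicate (n + 1).toNat (0 : Int)
    let population := PySem.List.pySetD population 1 1
    let population := PySem.List.pySetD population 2 1
    let population := (PySem.List.pyRange 3 (n + 1) 1).foldl
      (fun pop i => PySem.List.pySetD pop i
        (PySem.List.pyGetD pop (i - 1) 0 + k * PySem.List.pyGetD pop (i - 2) 0)) population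
    PySem.List.pyGetD population n 0

-- ===== PORT B =====
-- 2x2 matrix product, as Source B's mul on 4-tuples
def pvMul (A B : Int × Int × Int × Int) : Int × Int × Int × Int :=
  (A.1 * B.1 + A.2.1 * B.2.2.1, A.1 * B.2.1 + A.2.1 * B.2.2.2,
   A.2.2.1 * B.1 + A.2.2.2 * B.2.2.1, A.2.2.1 * B.2.1 + A.2.2.2 * B.2.2.2)

-- Source B's while-loop: square-and-multiply on the exponent's bits
def pvBinPow (R M : Int × Int × Int × Int) (e : Nat) : Int × Int × Int × Int :=
  if e = 0 then R
  else pvBinPow (if e % 2 = 1 then pvMul R M else R) (pvMul M M) (e / 2)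
termination_by e
decreasing_by omega

def rabbit_population_alt (n : Int) (k : Int) : Int :=
  if n ≤ 0 then 0
  else (pvBinPow (1, 0, 0, 1) (1, k, 1, 0) (n - 1).toNat).1

-- ===== PRECONDITION & SPEC =====
def Spec_rabbit_population (n : Int) (k : Int) (out : Int) : Prop := out = rabbit_population_alt n k
instance (n : Int) (k : Int) (out : Int) : Decidable (Spec_rabbit_population n k out) := by unfold Spec_rabbit_population; infer_instance

-- ===== CLAIM =====
def Claim_equal_rabbit_population : Prop := ∀ (n : Int) (k : Int), Dom_rabbit_population n k → Spec_rabbit_population n k (rabbit_population n k)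

-- ===== LEMMAS AND PROOFS =====

-- the sequence both programs compute: F 0 = 0, F 1 = 1, F (m+2) = F (m+1) + k * F m
def pvF (k : Int) : Nat → Int
  | 0 => 0
  | 1 => 1
  | (m + 2) => pvF k (m + 1) + k * pvF k m

-- bottom-right entry of the m-th matrix power
def pvE (k : Int) (m : Nat) : Int := if m = 0 then 1 else k * pvF k (m - 1)

-- naive right-multiplication power, the reference for pvBinPow
def pvPow (M : Int × Int × Int × Int) : Nat → Int × Int × Int × Int
  | 0 => (1, 0, 0, 1)
  | (e + 1) => pvMul (pvPow M e) M

-- abbreviations for A's loop (definitionally equal to the port's inline code)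
def pvStep (k : Int) (pop : List Int) (i : Int) : List Int :=
  PySem.List.pySetD pop i (PySem.List.pyGetD pop (i - 1) 0 + k * PySem.List.pyGetD pop (i - 2) 0)

def pvInit (n : Int) : List Int :=
  PySem.List.pySetD (PySem.List.pySetD (List.replicate (n + 1).toNat (0 : Int)) 1 1) 2 1

def pvTable (n k b : Int) : List Int := (PySem.List.pyRange 3 b 1).foldl (pvStep k) (pvInit n)

theorem pvMul_assoc (A B C : Int × Int × Int × Int) :
    pvMul (pvMul A B) C = pvMul A (pvMul B C) := by
  obtain ⟨a, b, c, d⟩ := A; obtain ⟨e, f, g, h⟩ := B; obtain ⟨p, q, r, s⟩ := C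
  simp only [pvMul, Prod.mk.injEq]
  refine ⟨by ring, by ring, by ring, by ring⟩

theorem pvMul_one (A : Int × Int × Int × Int) : pvMul (1, 0, 0, 1) A = A := by
  obtain ⟨a, b, c, d⟩ := A; simp [pvMul]

theorem pvPow_mul_comm (M : Int × Int × Int × Int) (e : Nat) :
    pvMul M (pvPow M e) = pvMul (pvPow M e) M := by
  induction e with
  | zero => simp [pvPow, pvMul_one]; obtain ⟨a, b, c, d⟩ := M; simp [pvMul]
  | succ e ih => simp [pvPow, ← pvMul_assoc, ih]

theorem pvPow_double (M : Int × Int × Int × Int) (q : Nat) :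
    pvPow (pvMul M M) q = pvPow M (2 * q) := by
  induction q with
  | zero => rfl
  | succ q ih =>
    have h : 2 * (q + 1) = 2 * q + 1 + 1 := by ring
    rw [h]
    simp [pvPow, ih, pvMul_assoc]

theorem pvBinPow_spec (e : Nat) : ∀ R M, pvBinPow R M e = pvMul R (pvPow M e) := by
  induction e using Nat.strong_induction_on with
  | _ e ih =>
    intro R M
    rw [pvBinPow]
    by_cases h0 : e = 0
    · simp only [h0, pvPow]
      obtain ⟨a, b, c, d⟩ := R; simp [pvMul]
    · simp only [h0, if_false]
      rw [ih (e / 2) (Nat.div_lt_self (by omega) one_lt_two)]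
      rcases Nat.mod_two_eq_zero_or_one e with h2 | h2
      · rw [if_neg (by omega), pvPow_double,
          show 2 * (e / 2) = e by omega]
      · rw [if_pos h2, pvPow_double]
        conv_rhs => rw [show e = 2 * (e / 2) + 1 by omega]
        rw [pvPow, pvMul_assoc, pvPow_mul_comm]

theorem pvPow_step_sum (k : Int) (m : Nat) : pvF k m + pvE k m = pvF k (m + 1) := by
  cases m with
  | zero => simp [pvF, pvE]
  | succ s =>
    rw [pvE, if_neg (Nat.succ_ne_zero s), Nat.add_sub_cancel, pvF]

theorem pvPow_entries (k : Int) (m : Nat) :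
    pvPow (1, k, 1, 0) m = (pvF k (m + 1), k * pvF k m, pvF k m, pvE k m) := by
  induction m with
  | zero => simp [pvPow, pvF, pvE]
  | succ m ih =>
    rw [pvPow, ih]
    simp only [pvMul, Prod.mk.injEq]
    refine ⟨?_, by ring, ?_, ?_⟩
    · rw [pvF]; ring
    · have h := pvPow_step_sum k m; push_cast at h ⊢; linarith
    · rw [show pvE k (m + 1) = k * pvF k m from by
        rw [pvE, if_neg (Nat.succ_ne_zero m), Nat.add_sub_cancel]]
      ring

theorem alt_eq_pvF (n k : Int) (hn : 1 ≤ n) :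
    rabbit_population_alt n k = pvF k n.toNat := by
  have h0 : ¬ n ≤ 0 := by omega
  rw [rabbit_population_alt, if_neg h0, pvBinPow_spec, pvMul_one, pvPow_entries,
    show (n - 1).toNat + 1 = n.toNat by omega]

theorem pvInit_eq (n : Int) :
    pvInit n = ((List.replicate (n + 1).toNat (0 : Int)).set 1 1).set 2 1 := by
  rw [pvInit, PySem.List.pySetD_of_nonneg _ _ (by norm_num),
    PySem.List.pySetD_of_nonneg _ _ (by norm_num)]
  simp

-- the DP table after processing range(3, m+1): entries 0..m hold pvF
theorem loop_inv (n k : Int) (hn : 3 ≤ n) (m : Nat) (hm2 : 2 ≤ m) (hmn : (m : Int) ≤ n) :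
    (pvTable n k ((m : Int) + 1)).length = (n + 1).toNat ∧
      ∀ j : Nat, j ≤ m → (pvTable n k ((m : Int) + 1)).getD j 0 = pvF k j := by
  induction m with
  | zero => omega
  | succ m ih =>
    by_cases hm : m = 1
    · -- base case m + 1 = 2 : empty range, initial table
      subst hm
      have hr : pvTable n k (((1 : Nat) + 1 : Nat) + 1) = pvInit n := by
        rw [pvTable, PySem.List.pyRange_one_eq_nil (by norm_num), List.foldl_nil]
      rw [hr, pvInit_eq]
      have hlen : 4 ≤ (n + 1).toNat := by omega
      refine ⟨by simp, ?_⟩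
      intro j hj
      have e0 : (0 : Nat) < (n + 1).toNat := by omega
      have e1 : (1 : Nat) < (n + 1).toNat := by omega
      have e2 : (2 : Nat) < (n + 1).toNat := by omega
      interval_cases j <;>
        simp [List.getD_eq_getElem?_getD, pvF, e0, e1, e2]
    · -- step: m ≥ 2, extend the range by one index m + 1
      obtain ⟨ihlen, ihval⟩ := ih (by omega) (by omega)
      have hsplit : pvTable n k (((m + 1 : Nat) : Int) + 1)
          = pvStep k (pvTable n k ((m : Int) + 1)) ((m : Int) + 1) := by
        rw [pvTable, show ((m + 1 : Nat) : Int) + 1 = ((m : Int) + 1) + 1 by push_cast; ring,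
          PySem.List.pyRange_one_succ_right (by omega), List.foldl_append,
          List.foldl_cons, List.foldl_nil, pvTable]
      set L0 := pvTable n k ((m : Int) + 1) with hL0
      have hv : L0.getD m 0 + k * L0.getD (m - 1) 0 = pvF k (m + 1) := by
        rw [ihval m (by omega), ihval (m - 1) (by omega),
          show m = (m - 2) + 2 by omega]
        rw [pvF]
        congr 2
      have hstep : pvStep k L0 ((m : Int) + 1)
          = L0.set (m + 1) (L0.getD m 0 + k * L0.getD (m - 1) 0) := by
        rw [pvStep, show ((m : Int) + 1 - 1) = ((m : Nat) : Int) by ring,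
          show ((m : Int) + 1 - 2) = (((m - 1 : Nat) : Nat) : Int) by omega,
          show ((m : Int) + 1) = (((m + 1 : Nat) : Nat) : Int) by omega,
          PySem.List.pyGetD_natCast, PySem.List.pyGetD_natCast, PySem.List.pySetD_natCast]
      have hlt : m + 1 < L0.length := by rw [ihlen]; omega
      rw [hsplit, hstep]
      refine ⟨by simp [ihlen], ?_⟩
      intro j hj
      rw [List.getD_eq_getElem?_getD, List.getElem?_set]
      by_cases hje : m + 1 = j
      · subst hje
        rw [if_pos rfl, if_pos hlt, Option.getD_some, hv]
      · rw [if_neg hje, ← List.getD_eq_getElem?_getD]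
        exact ihval j (by omega)

theorem a_eq_pvF (n k : Int) (hn : 1 ≤ n) :
    rabbit_population n k = pvF k n.toNat := by
  have h0 : ¬ n ≤ 0 := by omega
  by_cases h12 : n = 1 ∨ n = 2
  · rw [rabbit_population, if_neg h0, if_pos h12]
    rcases h12 with h | h <;> subst h <;> simp [pvF]
  · have hn3 : 3 ≤ n := by omega
    have ha : rabbit_population n k = PySem.List.pyGetD (pvTable n k (n + 1)) n 0 := by
      rw [rabbit_population, if_neg h0, if_neg h12]; rfl
    obtain ⟨-, hval⟩ := loop_inv n k hn3 n.toNat (by omega) (by omega)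
    rw [ha, show (n + 1 : Int) = ((n.toNat : Nat) : Int) + 1 by omega,
      PySem.List.pyGetD_of_nonneg _ _ (by omega)]
    exact hval n.toNat le_rfl

-- ===== VERDICT =====
theorem rabbit_population_spec : Claim_equal_rabbit_population := by
  intro n k _
  unfold Spec_rabbit_population
  by_cases hn : n ≤ 0
  · rw [rabbit_population, if_pos hn, rabbit_population_alt, if_pos hn]
  · rw [a_eq_pvF n k (by omega), alt_eq_pvF n k (by omega)]
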